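-- pv_equiv track=rewrite | github.com/Prabhatrajput7/cadeBASE | Pycharm/pythonProject/digi.py | Sub_Sequences
-- ===== SOURCE A (Python) =====
-- import itertools
--
-- def Sub_Sequences(STR):
--     combs = []
--     for l in range(1, len(STR) + 1):
--         combs.append(list(itertools.combinations(STR, l)))
--     l,l1 = [],[]
--     for c in combs:
--         for t in c:
--             l.append(t)
--     for i in l:
--         if len(i)==len(STR)-2:
--             l1.append(i)
--     return len(l1)
-- ===== SOURCE B (Python) =====
-- def Sub_Sequences(STR):
--     # closed form: among subsequence lengths 1..n, those of length n-2 number C(n, n-2) = n*(n-1)/2,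
--     # and length n-2 is in that range only when n >= 3.
--     n = len(STR)
--     return n * (n - 1) // 2 if n >= 3 else 0
-- ===== Notes on version B (the rewrite author's own statement) =====
-- stated objective: faster
-- what changed: Replaces enumerating all 2^n-1 combinations and filtering by length with the closed-form binomial count C(n,2)=n*(n-1)//2 (0 for n<3).
import Mathlib
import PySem

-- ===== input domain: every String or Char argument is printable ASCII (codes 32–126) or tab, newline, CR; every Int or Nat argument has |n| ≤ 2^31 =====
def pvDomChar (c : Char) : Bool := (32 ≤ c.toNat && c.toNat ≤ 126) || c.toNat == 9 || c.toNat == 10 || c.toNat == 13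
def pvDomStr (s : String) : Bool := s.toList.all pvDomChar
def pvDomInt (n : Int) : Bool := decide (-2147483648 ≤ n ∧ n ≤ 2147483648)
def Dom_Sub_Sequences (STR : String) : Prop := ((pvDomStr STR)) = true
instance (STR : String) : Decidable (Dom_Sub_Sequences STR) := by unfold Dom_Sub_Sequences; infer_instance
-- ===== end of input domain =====

-- B replaces A's exponential enumeration of all combinations with the closed-form count n*(n-1)//2 (0 for n<3): objective 'faster'.

-- ===== PORT A =====
-- itertools.combinations(STR, l): order-preserving l-element sublists (library call, ported as the standard recursion)
def pvCombos : Nat → List Char → List (List Char)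
  | 0, _ => [[]]
  | _ + 1, [] => []
  | k + 1, c :: cs => ((pvCombos k cs).map (fun t => c :: t)) ++ pvCombos (k + 1) cs

def Sub_Sequences (STR : String) : Int :=
  let s := STR.toList
  -- for l in range(1, len(STR)+1): combs.append(list(itertools.combinations(STR, l)))
  let combs : List (List (List Char)) :=
    (PySem.List.pyRange 1 ((s.length : Int) + 1) 1).foldl
      (fun acc l => acc ++ [pvCombos l.toNat s]) []
  -- for c in combs: for t in c: l.append(t)
  let lst : List (List Char) :=
    combs.foldl (fun acc c => c.foldl (fun a t => a ++ [t]) acc) []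
  -- for i in l: if len(i)==len(STR)-2: l1.append(i)
  let l1 : List (List Char) :=
    lst.foldl (fun a i => if (i.length : Int) = (s.length : Int) - 2 then a ++ [i] else a) []
  (l1.length : Int)

-- ===== PORT B =====
def Sub_Sequences_alt (STR : String) : Int :=
  let n : Int := PySem.Str.len STR
  if 3 ≤ n then PySem.Int.floordiv (n * (n - 1)) 2 else 0

-- ===== PRECONDITION & SPEC =====
def Spec_Sub_Sequences (STR : String) (out : Int) : Prop := out = Sub_Sequences_alt STR
instance (STR : String) (out : Int) : Decidable (Spec_Sub_Sequences STR out) := by unfold Spec_Sub_Sequences; infer_instance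

-- ===== CLAIM (what is proved, stated in full; the proofs are below) =====
def Claim_equal_Sub_Sequences : Prop := ∀ (STR : String), Dom_Sub_Sequences STR → Spec_Sub_Sequences STR (Sub_Sequences STR)

-- ===== LEMMAS AND PROOFS =====

theorem pvCombos_length_mem (s : List Char) : ∀ (k : Nat) (x : List Char), x ∈ pvCombos k s → x.length = k := by
  induction s with
  | nil => intro k x hx; cases k with
    | zero => simp [pvCombos] at hx; simp [hx]
    | succ k => simp [pvCombos] at hx
  | cons c cs ih =>
    intro k x hx
    cases k with
    | zero => simp [pvCombos] at hx; simp [hx]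
    | succ k =>
      simp only [pvCombos, List.mem_append, List.mem_map] at hx
      rcases hx with ⟨t, ht, rfl⟩ | hx
      · simp [ih k t ht]
      · exact ih (k + 1) x hx

theorem pvCombos_count (s : List Char) : ∀ (k : Nat), (pvCombos k s).length = s.length.choose k := by
  induction s with
  | nil => intro k; cases k <;> simp [pvCombos]
  | cons c cs ih =>
    intro k
    cases k with
    | zero => simp [pvCombos]
    | succ k => simp [pvCombos, ih, Nat.choose_succ_succ]

theorem flatten_foldl {α : Type} (L : List (List α)) (acc : List α) :
    L.foldl (fun a c => a ++ c) acc = acc ++ L.flatten := by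
  induction L generalizing acc with
  | nil => simp
  | cons c L ih => rw [List.foldl_cons, ih]; simp

-- count in pvCombos k s of elements of length T
theorem pvCombos_countP (s : List Char) (k : Nat) (T : Int) :
    (pvCombos k s).countP (fun i => decide ((i.length : Int) = T))
      = if (k : Int) = T then s.length.choose k else 0 := by
  by_cases h : (k : Int) = T
  · rw [if_pos h, ← pvCombos_count s k]
    apply List.countP_eq_length.mpr
    intro x hx
    simp [pvCombos_length_mem s k x hx, h]
  · rw [if_neg h]
    apply List.countP_eq_zero.mpr
    intro x hx
    simp [pvCombos_length_mem s k x hx, h]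

-- sum of counts over l ∈ range(1, m+1)
theorem range_sum (s : List Char) (T : Int) : ∀ (m : Nat),
    (((PySem.List.pyRange 1 ((m : Int) + 1) 1).map
        (fun l => (pvCombos l.toNat s).countP (fun i => decide ((i.length : Int) = T)))).sum)
      = if 1 ≤ T ∧ T ≤ (m : Int) then s.length.choose T.toNat else 0 := by
  intro m
  induction m with
  | zero =>
    rw [PySem.List.pyRange_one_eq_nil (by norm_num)]
    simp; omega
  | succ m ih =>
    rw [show ((m + 1 : Nat) : Int) + 1 = ((m : Int) + 1) + 1 by push_cast; ring,
        PySem.List.pyRange_one_succ_right (by omega)]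
    simp only [List.map_append, List.map_cons, List.map_nil, List.sum_append,
      List.sum_cons, List.sum_nil]
    rw [ih, pvCombos_countP, show ((m : Int) + 1).toNat = m + 1 from by omega]
    by_cases h1 : ((m + 1 : Nat) : Int) = T
    · have hT : T.toNat = m + 1 := by omega
      rw [if_pos h1, if_neg (show ¬(1 ≤ T ∧ T ≤ (m : Int)) from by omega),
          if_pos (show 1 ≤ T ∧ T ≤ ((m + 1 : Nat) : Int) from by omega), hT]
      omega
    · rw [if_neg h1]
      by_cases h2 : 1 ≤ T ∧ T ≤ (m : Int)
      · rw [if_pos h2, if_pos (show 1 ≤ T ∧ T ≤ ((m + 1 : Nat) : Int) from by omega)]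
        omega
      · rw [if_neg h2, if_neg (show ¬(1 ≤ T ∧ T ≤ ((m + 1 : Nat) : Int)) from by omega)]
        omega

theorem foldl_if_filter {α : Type} (p : α → Prop) [DecidablePred p] (l acc : List α) :
    l.foldl (fun a i => if p i then a ++ [i] else a) acc = acc ++ l.filter (fun i => decide (p i)) := by
  induction l generalizing acc with
  | nil => simp
  | cons x l ih => by_cases h : p x <;> simp [h, ih]

theorem cast_div_two (n : Nat) (h : 3 ≤ n) :
    ((n * (n - 1) / 2 : Nat) : Int) = (n : Int) * ((n : Int) - 1) / 2 := by
  obtain ⟨k, rfl⟩ : ∃ k, n = k + 3 := ⟨n - 3, by omega⟩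
  rw [show k + 3 - 1 = k + 2 from rfl, Int.natCast_div]
  push_cast
  congr 1
  ring

theorem sub_sequences_eq (STR : String) :
    Sub_Sequences STR
      = (if 1 ≤ (STR.toList.length : Int) - 2 ∧ (STR.toList.length : Int) - 2 ≤ (STR.toList.length : Int)
          then (STR.toList.length.choose ((STR.toList.length : Int) - 2).toNat : Int) else 0) := by
  unfold Sub_Sequences
  simp only [PySem.List.foldl_append_singleton, PySem.List.foldl_append_singleton_eq_map,
    List.nil_append, flatten_foldl,
    foldl_if_filter (fun i => (List.length i : Int) = (STR.toList.length : Int) - 2)]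
  rw [← List.countP_eq_length_filter, List.countP_flatten, List.map_map]
  have h := range_sum STR.toList ((STR.toList.length : Int) - 2) STR.toList.length
  simp only [Function.comp_def] at h ⊢
  rw [h]
  split_ifs <;> simp

-- ===== VERDICT (by name: the statement is the Claim_ definition above) =====
theorem Sub_Sequences_spec : Claim_equal_Sub_Sequences := by
  intro STR _
  unfold Spec_Sub_Sequences Sub_Sequences_alt
  rw [sub_sequences_eq, PySem.Str.len_eq]
  set n := STR.toList.length with hn
  by_cases h3 : 3 ≤ (n : Int)
  · rw [if_pos (by omega), if_pos h3]
    rw [show ((n : Int) - 2).toNat = n - 2 from by omega,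
        Nat.choose_symm (show 2 ≤ n from by omega), Nat.choose_two_right,
        PySem.Int.floordiv_eq_ediv_of_pos (by norm_num)]
    exact cast_div_two n (by omega)
  · rw [if_neg (by omega), if_neg h3]
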